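-- pv_equiv track=rewrite | github.com/andreisas/ProiectLicenta | STMGUIv2/STMClass.py | getPartialConditions
-- ===== SOURCE A (Python) =====
-- def getPartialConditions(cond):
-- 	'''
-- 	Split a condition into partial conditions
-- 	'''
-- 	condList = []
-- 	slicedCond = cond.split('&&')
-- 	for sl in slicedCond:
-- 		if sl != "":
-- 			if '||' not in sl:
-- 				condList.append(sl.replace(" ", ""))
-- 			else:
-- 				secondSlice = sl.split('||')
-- 				for ssl in secondSlice:
-- 					if ssl != "":
-- 						condList.append(ssl.replace(" ", ""))
-- 	return condList
-- ===== SOURCE B (Python) =====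
-- def getPartialConditions(cond):
-- 	'''
-- 	Split a condition into partial conditions
-- 	'''
-- 	condList = []
-- 	buf = []
-- 	i = 0
-- 	n = len(cond)
-- 	while i < n:
-- 		if cond[i:i+2] in ('&&', '||'):
-- 			if buf:
-- 				condList.append(''.join(buf).replace(' ', ''))
-- 			buf = []
-- 			i += 2
-- 		else:
-- 			buf.append(cond[i])
-- 			i += 1
-- 	if buf:
-- 		condList.append(''.join(buf).replace(' ', ''))
-- 	return condList
-- ===== Notes on version B (the rewrite author's own statement) =====
-- stated objective: alternative
-- what changed: Replaces the nested split('&&')/split('||') passes with a single left-to-right character scan that recognises both two-character delimiters on the fly, flushing the buffered segment (emptiness checked before space removal) as it goes.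
import Mathlib
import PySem

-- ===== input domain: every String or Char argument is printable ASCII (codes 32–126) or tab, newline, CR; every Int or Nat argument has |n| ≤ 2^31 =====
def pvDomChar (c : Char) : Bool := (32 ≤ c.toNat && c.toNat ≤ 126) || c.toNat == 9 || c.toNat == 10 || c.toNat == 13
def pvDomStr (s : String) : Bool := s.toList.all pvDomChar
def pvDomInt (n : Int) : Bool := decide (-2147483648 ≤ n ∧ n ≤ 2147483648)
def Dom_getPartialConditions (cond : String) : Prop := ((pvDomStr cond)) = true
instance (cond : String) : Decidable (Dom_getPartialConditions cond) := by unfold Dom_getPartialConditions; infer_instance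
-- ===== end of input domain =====

-- B replaces the nested split('&&')/split('||') passes by one left-to-right scan
-- recognising both two-character delimiters on the fly (alternative decomposition, same cost).

-- ===== PORT A =====
-- cond.split('&&') / sl.split('||'): the separators are the nonempty literals "&&"/"||",
-- so Python never raises; `(PySem.Str.split? _ sep).getD []` is exactly that `some` value.
def getPartialConditions (cond : String) : List String :=
  let slicedCond : List String := (PySem.Str.split? cond "&&").getD []
  slicedCond.foldl (fun condList sl =>
    if sl ≠ "" then
      if PySem.Str.isIn "||" sl = false then
        condList ++ [PySem.Str.replace sl " " ""]
      else
        ((PySem.Str.split? sl "||").getD []).foldl (fun cl ssl =>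
          if ssl ≠ "" then cl ++ [PySem.Str.replace ssl " " ""] else cl) condList
    else condList) []

-- ===== PORT B =====
-- `if buf: condList.append(''.join(buf).replace(' ', ''))`
def pvFlush (buf : List Char) : List String :=
  if buf.isEmpty then [] else [PySem.Str.replace (String.ofList buf) " " ""]

-- the scan loop: `cond[i:i+2] in ('&&','||')` flushes and skips 2, else buffers 1 char
def pvScan : List Char → List Char → List String
  | [], buf => pvFlush buf
  | [c], buf => pvScan [] (buf ++ [c])
  | x :: y :: r, buf =>
    if (x == '&' && y == '&') || (x == '|' && y == '|') then
      pvFlush buf ++ pvScan r []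
    else
      pvScan (y :: r) (buf ++ [x])

def getPartialConditions_alt (cond : String) : List String := pvScan cond.toList []

-- ===== PRECONDITION & SPEC =====
def Spec_getPartialConditions (cond : String) (out : List String) : Prop := out = getPartialConditions_alt cond
instance (cond : String) (out : List String) : Decidable (Spec_getPartialConditions cond out) := by unfold Spec_getPartialConditions; infer_instance

-- ===== CLAIM (what is proved, stated in full; the proofs are below) =====
def Claim_equal_getPartialConditions : Prop := ∀ (cond : String), Dom_getPartialConditions cond → Spec_getPartialConditions cond (getPartialConditions cond)

-- ===== LEMMAS AND PROOFS =====

-- prepend a char to the first piece (CPython split semantics helper)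
def pvMapHd (c : Char) : List (List Char) → List (List Char)
  | [] => [[c]]
  | h :: t => (c :: h) :: t

-- structural form of `split(sep)` for a two-character separator [a, b]
def pvSplit2 (a b : Char) : List Char → List (List Char)
  | [] => [[]]
  | [x] => [[x]]
  | x :: y :: r => if x == a && y == b then [] :: pvSplit2 a b r else pvMapHd x (pvSplit2 a b (y :: r))

-- flat split on both delimiters at once (the segment list pvScan walks through)
def pvFlat : List Char → List (List Char)
  | [] => [[]]
  | [x] => [[x]]
  | x :: y :: r =>
    if (x == '&' && y == '&') || (x == '|' && y == '|') then [] :: pvFlat r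
    else pvMapHd x (pvFlat (y :: r))

-- keep nonempty segments, remove spaces
def pvEmit (L : List (List Char)) : List String :=
  (L.filter (fun l => !l.isEmpty)).map (fun l => PySem.Str.replace (String.ofList l) " " "")

theorem pvSplit2_ne_nil (a b : Char) (l : List Char) : pvSplit2 a b l ≠ [] := by
  match l with
  | [] => simp [pvSplit2]
  | [x] => simp [pvSplit2]
  | x :: y :: r =>
    simp only [pvSplit2]
    split
    · simp
    · cases pvSplit2 a b (y :: r) <;> simp [pvMapHd]

theorem pvFlat_ne_nil (l : List Char) : pvFlat l ≠ [] := by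
  match l with
  | [] => simp [pvFlat]
  | [x] => simp [pvFlat]
  | x :: y :: r =>
    simp only [pvFlat]
    split
    · simp
    · cases pvFlat (y :: r) <;> simp [pvMapHd]

theorem pvGo_cons (sep : List Char) (fuel : Nat) (c : Char) (rest cur : List Char)
    (acc : List (List Char)) :
    PySem.Chars.splitOn.go sep (fuel + 1) (c :: rest) cur acc =
      (if sep.isPrefixOf (c :: rest) then
        PySem.Chars.splitOn.go sep fuel (List.drop sep.length (c :: rest)) [] (cur.reverse :: acc)
      else PySem.Chars.splitOn.go sep fuel rest (c :: cur) acc) := by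
  rw [PySem.Chars.splitOn.go.eq_def]

theorem pvSplit2_go_spec (a b : Char) (fuel : Nat) (l cur : List Char)
    (acc : List (List Char)) (h : l.length ≤ fuel) :
    PySem.Chars.splitOn.go [a, b] fuel l cur acc =
      acc.reverse ++ ((cur.reverse ++ (pvSplit2 a b l).headI) :: (pvSplit2 a b l).tail) := by
  induction fuel generalizing l cur acc with
  | zero =>
    cases l with
    | nil => simp [PySem.Chars.splitOn.go, pvSplit2]
    | cons c t => simp at h
  | succ fuel ih =>
    match l with
    | [] => simp [PySem.Chars.splitOn.go, pvSplit2]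
    | [c] =>
      rw [pvGo_cons]
      rw [if_neg (by simp [List.isPrefixOf])]
      rw [ih [] (c :: cur) acc (by simp)]
      simp [pvSplit2]
    | c :: y :: r =>
      rw [pvGo_cons]
      by_cases hd : c = a ∧ y = b
      · obtain ⟨rfl, rfl⟩ := hd
        rw [if_pos (by simp [List.isPrefixOf])]
        have hdrop : List.drop [c, y].length (c :: y :: r) = r := rfl
        rw [hdrop]
        rw [ih r [] (cur.reverse :: acc) (by simp at h ⊢; omega)]
        have hne := pvSplit2_ne_nil c y r
        cases hS : pvSplit2 c y r with
        | nil => exact absurd hS hne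
        | cons hh tt => simp [pvSplit2, hS]
      · have hb : (c == a && y == b) = false := by
          simp only [Bool.and_eq_false_iff, beq_eq_false_iff_ne, ne_eq]
          by_cases hc : c = a
          · right; exact fun hy => hd ⟨hc, hy⟩
          · left; exact hc
        rw [if_neg (by simp [List.isPrefixOf]; intro h1 h2; exact hd ⟨h1.symm, h2.symm⟩)]
        rw [ih (y :: r) (c :: cur) acc (by simp at h ⊢; omega)]
        have hne := pvSplit2_ne_nil a b (y :: r)
        cases hS : pvSplit2 a b (y :: r) with
        | nil => exact absurd hS hne
        | cons hh tt => simp [pvSplit2, hb, hS, pvMapHd]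

theorem pvSplitOn_eq (a b : Char) (l : List Char) :
    PySem.Chars.splitOn l [a, b] = pvSplit2 a b l := by
  unfold PySem.Chars.splitOn
  rw [pvSplit2_go_spec a b (l.length + 1) l [] [] (by omega)]
  have hne := pvSplit2_ne_nil a b l
  cases hS : pvSplit2 a b l with
  | nil => exact absurd hS hne
  | cons hh tt => simp

theorem pvSplit2_head (a b : Char) (l : List Char) (h : (pvSplit2 a b l).headI ≠ []) :
    (pvSplit2 a b l).headI.head? = l.head? := by
  match l with
  | [] => simp [pvSplit2] at h
  | [x] => simp [pvSplit2]
  | x :: y :: r =>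
    simp only [pvSplit2] at h ⊢
    by_cases hc : (x == a && y == b) = true
    · simp [hc] at h
    · simp only [hc, Bool.false_eq_true, if_false] at h ⊢
      cases pvSplit2 a b (y :: r) <;> simp [pvMapHd]

theorem pvSplit2_cons (a b x : Char) (l : List Char) (h : ¬ (x = a ∧ l.head? = some b)) :
    pvSplit2 a b (x :: l) = pvMapHd x (pvSplit2 a b l) := by
  match l with
  | [] => simp [pvSplit2, pvMapHd]
  | y :: t =>
    have : (x == a && y == b) = false := by
      simp only [Bool.and_eq_false_iff, beq_eq_false_iff_ne, ne_eq]
      by_cases hx : x = a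
      · right; exact fun hy => h ⟨hx, by simp [hy]⟩
      · left; exact hx
    simp [pvSplit2, this]

theorem pvSplit2_no_infix (a b : Char) (l : List Char) (h : ¬ [a, b] <:+: l) :
    pvSplit2 a b l = [l] := by
  match l with
  | [] => simp [pvSplit2]
  | [x] => simp [pvSplit2]
  | x :: y :: r =>
    have hxy : (x == a && y == b) = false := by
      by_contra hc
      rw [Bool.not_eq_false, Bool.and_eq_true, beq_iff_eq, beq_iff_eq] at hc
      obtain ⟨rfl, rfl⟩ := hc
      exact h ⟨[], r, rfl⟩
    have hr : ¬ [a, b] <:+: (y :: r) := fun hi => h (List.infix_cons hi)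
    rw [pvSplit2, hxy]
    simp only [Bool.false_eq_true, if_false]
    rw [pvSplit2_no_infix a b (y :: r) hr, pvMapHd]

theorem pvFlat_eq_flatMap (l : List Char) :
    (pvSplit2 '&' '&' l).flatMap (pvSplit2 '|' '|') = pvFlat l := by
  match l with
  | [] => simp [pvSplit2, pvFlat]
  | [x] => simp [pvSplit2, pvFlat]
  | x :: y :: r =>
    by_cases hand : x = '&' ∧ y = '&'
    · obtain ⟨rfl, rfl⟩ := hand
      rw [show pvSplit2 '&' '&' ('&' :: '&' :: r) = [] :: pvSplit2 '&' '&' r by simp [pvSplit2]]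
      rw [show pvFlat ('&' :: '&' :: r) = [] :: pvFlat r by simp [pvFlat]]
      simp only [List.flatMap_cons]
      rw [pvFlat_eq_flatMap r]
      simp [pvSplit2]
    · by_cases hor : x = '|' ∧ y = '|'
      · obtain ⟨rfl, rfl⟩ := hor
        have h1 : pvSplit2 '&' '&' ('|' :: '|' :: r) = pvMapHd '|' (pvMapHd '|' (pvSplit2 '&' '&' r)) := by
          rw [pvSplit2_cons '&' '&' '|' ('|' :: r) (by simp)]
          rw [pvSplit2_cons '&' '&' '|' r (by simp)]
        rw [h1]
        rw [show pvFlat ('|' :: '|' :: r) = [] :: pvFlat r by simp [pvFlat]]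
        have hne := pvSplit2_ne_nil '&' '&' r
        cases hS : pvSplit2 '&' '&' r with
        | nil => exact absurd hS hne
        | cons hh tt =>
          simp only [pvMapHd, List.flatMap_cons]
          rw [show pvSplit2 '|' '|' ('|' :: '|' :: hh) = [] :: pvSplit2 '|' '|' hh by simp [pvSplit2]]
          have := pvFlat_eq_flatMap r
          rw [hS] at this
          simp only [List.flatMap_cons] at this
          simp only [List.cons_append, this]
      · have hxy : pvSplit2 '&' '&' (x :: y :: r) = pvMapHd x (pvSplit2 '&' '&' (y :: r)) := by
          apply pvSplit2_cons
          rintro ⟨rfl, hy⟩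
          simp at hy
          exact hand ⟨rfl, hy⟩
        have hfl : pvFlat (x :: y :: r) = pvMapHd x (pvFlat (y :: r)) := by
          rw [pvFlat]
          have : ((x == '&' && y == '&') || (x == '|' && y == '|')) = false := by
            simp only [Bool.or_eq_false_iff, Bool.and_eq_false_iff, beq_eq_false_iff_ne, ne_eq]
            constructor
            · by_cases hx : x = '&'
              · right; exact fun hy => hand ⟨hx, hy⟩
              · left; exact hx
            · by_cases hx : x = '|'
              · right; exact fun hy => hor ⟨hx, hy⟩
              · left; exact hx
          rw [this]
          simp
        rw [hxy, hfl]
        have hne := pvSplit2_ne_nil '&' '&' (y :: r)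
        cases hS : pvSplit2 '&' '&' (y :: r) with
        | nil => exact absurd hS hne
        | cons hh tt =>
          simp only [pvMapHd, List.flatMap_cons]
          have hcons : pvSplit2 '|' '|' (x :: hh) = pvMapHd x (pvSplit2 '|' '|' hh) := by
            apply pvSplit2_cons
            rintro ⟨rfl, hhd⟩
            by_cases hhh : hh = []
            · subst hhh; simp at hhd
            · have h1 : (pvSplit2 '&' '&' (y :: r)).headI ≠ [] := by rw [hS]; simpa using hhh
              have h2 := pvSplit2_head '&' '&' (y :: r) h1
              rw [hS] at h2
              simp at h2
              rw [h2] at hhd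
              simp at hhd
              exact hor ⟨rfl, hhd⟩
          rw [hcons]
          have hIH := pvFlat_eq_flatMap (y :: r)
          rw [hS] at hIH
          simp only [List.flatMap_cons] at hIH
          rw [← hIH]
          cases hT : pvSplit2 '|' '|' hh with
          | nil => exact absurd hT (pvSplit2_ne_nil _ _ _)
          | cons g u => simp [pvMapHd]

theorem pvEmit_append (L M : List (List Char)) : pvEmit (L ++ M) = pvEmit L ++ pvEmit M := by
  simp [pvEmit]

theorem pvEmit_flatMap (f : List Char → List (List Char)) (L : List (List Char)) :
    pvEmit (L.flatMap f) = L.flatMap (fun l => pvEmit (f l)) := by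
  induction L with
  | nil => simp [pvEmit]
  | cons hh tt ih => simp only [List.flatMap_cons, pvEmit_append, ih]

theorem pvScan_emit (l buf : List Char) :
    pvScan l buf = pvEmit ((buf ++ (pvFlat l).headI) :: (pvFlat l).tail) := by
  match l with
  | [] =>
    simp only [pvScan, pvFlat, pvFlush, pvEmit]
    by_cases hb : buf = [] <;> simp [hb]
  | [c] =>
    simp only [pvScan, pvFlat, pvFlush, pvEmit]
    simp
  | x :: y :: r =>
    rw [pvScan]
    split
    · rw [show pvFlat (x :: y :: r) = [] :: pvFlat r by rw [pvFlat]; simp_all]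
      rw [pvScan_emit r []]
      have hne := pvFlat_ne_nil r
      cases hF : pvFlat r with
      | nil => exact absurd hF hne
      | cons hh tt =>
        simp only [List.headI, List.tail, List.nil_append, List.append_nil]
        by_cases hb : buf = [] <;> simp [hb, pvEmit, pvFlush]
    · rw [pvScan_emit (y :: r) (buf ++ [x])]
      have hfl : pvFlat (x :: y :: r) = pvMapHd x (pvFlat (y :: r)) := by
        rw [pvFlat]; simp_all
      rw [hfl]
      have hne := pvFlat_ne_nil (y :: r)
      cases hF : pvFlat (y :: r) with
      | nil => exact absurd hF hne
      | cons hh tt => simp [pvMapHd]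

theorem pvB_eq (cond : String) :
    getPartialConditions_alt cond = pvEmit (pvFlat cond.toList) := by
  rw [getPartialConditions_alt, pvScan_emit]
  have hne := pvFlat_ne_nil cond.toList
  cases hF : pvFlat cond.toList with
  | nil => exact absurd hF hne
  | cons hh tt => simp

theorem pvOfList_ne_empty (l : List Char) (h : l ≠ []) : String.ofList l ≠ "" :=
  fun e => h (by simpa using congrArg String.toList e)

theorem pvFoldInner (L : List (List Char)) (acc : List String) :
    L.foldl (fun cl ssl =>
      if String.ofList ssl ≠ "" then cl ++ [PySem.Str.replace (String.ofList ssl) " " ""] else cl)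
      acc = acc ++ pvEmit L := by
  induction L generalizing acc with
  | nil => simp [pvEmit]
  | cons hh tt ih =>
    by_cases hb : hh = []
    · subst hb
      simp only [List.foldl_cons, ih]
      simp [pvEmit]
    · simp only [List.foldl_cons, if_pos (pvOfList_ne_empty hh hb), ih]
      simp [pvEmit, hb]

theorem pvStepA (l : List Char) (acc : List String) :
    (if String.ofList l ≠ "" then
      if PySem.Str.isIn "||" (String.ofList l) = false then
        acc ++ [PySem.Str.replace (String.ofList l) " " ""]
      else
        ((PySem.Str.split? (String.ofList l) "||").getD []).foldl (fun cl ssl =>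
          if ssl ≠ "" then cl ++ [PySem.Str.replace ssl " " ""] else cl) acc
    else acc) = acc ++ pvEmit (pvSplit2 '|' '|' l) := by
  by_cases hb : l = []
  · subst hb
    simp [pvEmit, pvSplit2]
  · rw [if_pos (pvOfList_ne_empty l hb)]
    by_cases hin : PySem.Str.isIn "||" (String.ofList l) = false
    · rw [if_pos hin]
      have hni : ¬ ['|', '|'] <:+: l := by
        have := (PySem.Str.isIn_iff_infix (sub := "||") (s := String.ofList l))
        simp only [hin] at this
        intro hi
        have h2 : ("||" : String).toList <:+: (String.ofList l).toList := by
          simpa using hi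
        exact absurd (this.mpr h2) (by simp)
      rw [pvSplit2_no_infix '|' '|' l hni]
      simp [pvEmit, hb]
    · rw [if_neg hin]
      have hsplit : (PySem.Str.split? (String.ofList l) "||").getD [] =
          (pvSplit2 '|' '|' l).map String.ofList := by
        simp [PySem.Str.split?, PySem.Chars.split?, pvSplitOn_eq]
      rw [hsplit, List.foldl_map]
      exact pvFoldInner (pvSplit2 '|' '|' l) acc

theorem pvFoldOuter (S : List (List Char)) (acc : List String) :
    S.foldl (fun condList sl =>
      if String.ofList sl ≠ "" then
        if PySem.Str.isIn "||" (String.ofList sl) = false then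
          condList ++ [PySem.Str.replace (String.ofList sl) " " ""]
        else
          ((PySem.Str.split? (String.ofList sl) "||").getD []).foldl (fun cl ssl =>
            if ssl ≠ "" then cl ++ [PySem.Str.replace ssl " " ""] else cl) condList
      else condList) acc =
      acc ++ S.flatMap (fun sl => pvEmit (pvSplit2 '|' '|' sl)) := by
  induction S generalizing acc with
  | nil => simp
  | cons hh tt ih =>
    simp only [List.foldl_cons]
    rw [ih, pvStepA]
    simp [List.append_assoc]

theorem pvA_eq (cond : String) :
    getPartialConditions cond =
      (pvSplit2 '&' '&' cond.toList).flatMap (fun sl => pvEmit (pvSplit2 '|' '|' sl)) := by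
  unfold getPartialConditions
  have hsplit : (PySem.Str.split? cond "&&").getD [] =
      (pvSplit2 '&' '&' cond.toList).map String.ofList := by
    simp [PySem.Str.split?, PySem.Chars.split?, pvSplitOn_eq]
  rw [hsplit, List.foldl_map, pvFoldOuter]
  simp

-- ===== VERDICT (by name: the statement is the Claim_ definition above) =====
theorem getPartialConditions_spec : Claim_equal_getPartialConditions := by
  intro cond _
  unfold Spec_getPartialConditions
  rw [pvA_eq, pvB_eq, ← pvFlat_eq_flatMap, pvEmit_flatMap]
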